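-- pv_equiv track=rewrite | github.com/simuzin/Online_Judge | 프로그래머스/0/181830. 정사각형으로 만들기/정사각형으로 만들기.py | solution
-- ===== SOURCE A (Python) =====
-- def solution(arr):
--     r = len(arr)
--     l = len(arr[0])
--     if r > l :
--         for i in range(r):
--             temp = [0] * (r-l)
--             arr[i].extend(temp)
--     else:
--           for i in range(l-r):
--                 temp = [0] * l
--                 arr.append(temp)
--     return arr
-- ===== SOURCE B (Python) =====
-- def solution(arr):
--     # Build the n x n square row-by-index: row(i) is computed from the row index
--     # alone (existing row padded, or a fresh zero row), and the result is built
--     # by recursion over the index instead of A's two branched in-place loops.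
--     # Mutates arr in place (like A) via slice assignment and returns it.
--     r, l = len(arr), len(arr[0])
--     n = max(r, l)
--
--     def row(i):
--         return arr[i] + [0] * (n - l) if i < r else [0] * l
--
--     def build(i):
--         if i >= n:
--             return []
--         return [row(i)] + build(i + 1)
--
--     arr[:] = build(0)
--     return arr
-- ===== Notes on version B (the rewrite author's own statement) =====
-- stated objective: alternative
-- what changed: Instead of A's two-way branch with in-place extend/append loops, B defines the output square pointwise by row index (row(i) = padded existing row for i<r, fresh zero row otherwise) and materialises it by recursion over i from 0 to n=max(r,l), assigning the result back in place.
-- outside the precondition, e.g. on solution([]): A raises IndexError, B raises IndexError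
import Mathlib
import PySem

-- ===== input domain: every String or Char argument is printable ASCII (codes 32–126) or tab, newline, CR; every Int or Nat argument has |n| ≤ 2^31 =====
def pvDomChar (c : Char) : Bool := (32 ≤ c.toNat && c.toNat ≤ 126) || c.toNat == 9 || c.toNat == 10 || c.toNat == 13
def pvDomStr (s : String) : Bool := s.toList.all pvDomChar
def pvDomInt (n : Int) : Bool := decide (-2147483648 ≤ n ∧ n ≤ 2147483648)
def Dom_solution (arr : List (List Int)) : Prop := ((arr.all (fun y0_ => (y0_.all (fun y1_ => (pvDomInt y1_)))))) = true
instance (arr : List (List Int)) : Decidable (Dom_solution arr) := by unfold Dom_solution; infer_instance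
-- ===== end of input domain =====

-- B builds the square pointwise by row index via a recursion over i (row(i) = padded existing
-- row or fresh zero row) instead of A's two branched in-place loops; both mutate arr in place
-- in Python, the equivalence proved is about the returned value.

-- ===== PORT A =====
def solution (arr : List (List Int)) : List (List Int) :=
  let r : Int := arr.length
  let l : Int := ((PySem.List.pyGetD arr 0 []).length : Int)
  if r > l then
    (PySem.List.pyRange 0 r 1).foldl
      (fun a i => PySem.List.pySetD a i
        (PySem.List.pyGetD a i [] ++ List.replicate (r - l).toNat (0 : Int))) arr
  else
    (PySem.List.pyRange 0 (l - r) 1).foldl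
      (fun a _ => a ++ [List.replicate l.toNat (0 : Int)]) arr

-- ===== PORT B =====
-- Source B's row(i): padded existing row for i < r, fresh zero row otherwise.
def pvRow (arr : List (List Int)) (r l n i : Int) : List Int :=
  if i < r then PySem.List.pyGetD arr i [] ++ List.replicate (n - l).toNat (0 : Int)
  else List.replicate l.toNat (0 : Int)

-- Source B's build(i): recursion over the row index until i ≥ n.
def pvBuild (arr : List (List Int)) (r l n i : Int) : List (List Int) :=
  if n ≤ i then []
  else pvRow arr r l n i :: pvBuild arr r l n (i + 1)
termination_by (n - i).toNat
decreasing_by omega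

def solution_alt (arr : List (List Int)) : List (List Int) :=
  let r : Int := arr.length
  let l : Int := ((PySem.List.pyGetD arr 0 []).length : Int)
  let n : Int := max r l
  pvBuild arr r l n 0

-- ===== PRECONDITION & SPEC =====
-- Pre_ excludes only the empty array, on which A (and B) raise IndexError at arr[0].
def Pre_solution (arr : List (List Int)) : Prop := arr ≠ []
instance (arr : List (List Int)) : Decidable (Pre_solution arr) := by unfold Pre_solution; infer_instance
def pvWitness_solution : List (List Int) := [[1, 2], [3, 4], [5, 6]]

def Spec_solution (arr : List (List Int)) (out : List (List Int)) : Prop := out = solution_alt arr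
instance (arr : List (List Int)) (out : List (List Int)) : Decidable (Spec_solution arr out) := by unfold Spec_solution; infer_instance

-- ===== CLAIM (what is proved, stated in full; the proofs are below) =====
def Claim_equal_solution : Prop := ∀ (arr : List (List Int)), Dom_solution arr → Pre_solution arr → Spec_solution arr (solution arr)

-- ===== LEMMAS AND PROOFS =====

-- A's first loop (set index i to f of element i, for all i) is xs.map f.
theorem foldl_set_map {α : Type} (f : α → α) (d : α) :
    ∀ (suf pre : List α),
      (PySem.List.pyRange (pre.length) (pre.length + suf.length) 1).foldl
        (fun a i => PySem.List.pySetD a i (f (PySem.List.pyGetD a i d))) (pre ++ suf)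
      = pre ++ suf.map f := by
  intro suf
  induction suf with
  | nil => intro pre; simp
  | cons x s ih =>
    intro pre
    have hlt : (pre.length : Int) < pre.length + (x :: s).length := by
      simp
    rw [PySem.List.pyRange_one_cons hlt]
    simp only [List.foldl_cons]
    have hget : PySem.List.pyGetD (pre ++ x :: s) (pre.length : Int) d = x := by
      simp [List.getD]
    have hset : PySem.List.pySetD (pre ++ x :: s) (pre.length : Int) (f x)
        = (pre ++ [f x]) ++ s := by
      simp [List.set_append_right]
    rw [hget, hset]
    have h1 : ((pre.length : Int) + 1) = ((pre ++ [f x]).length : Int) := by simp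
    have h2 : ((pre.length : Int) + (x :: s).length) = ((pre ++ [f x]).length : Int) + s.length := by
      simp
      omega
    rw [h1, h2, ih (pre ++ [f x])]
    simp

-- A's second loop (append a constant row m times) is acc ++ replicate m c.
theorem foldl_append_const {α : Type} (c : α) :
    ∀ (m : Nat) (acc : List α),
      (List.range m).foldl (fun a (_ : Nat) => a ++ [c]) acc = acc ++ List.replicate m c := by
  intro m
  induction m with
  | zero => intro acc; simp
  | succ k ih =>
    intro acc
    rw [List.range_succ, List.foldl_append, ih]
    simp [List.replicate_succ']

-- B's recursion, characterised: from index i it yields the padded remaining rows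
-- followed by the missing zero rows.
theorem pvBuild_eq (arr : List (List Int)) (l n : Int)
    (hn : (arr.length : Int) ≤ n) :
    ∀ (i : Nat), (i : Int) ≤ n →
      pvBuild arr arr.length l n i
        = ((arr.drop i).map (fun row => row ++ List.replicate (n - l).toNat (0 : Int)))
          ++ List.replicate (n.toNat - max i arr.length) (List.replicate l.toNat (0 : Int)) := by
  intro i hi
  induction hfuel : (n - (i : Int)).toNat generalizing i with
  | zero =>
    have hin : (i : Int) = n := by omega
    rw [pvBuild, if_pos (le_of_eq hin.symm)]
    have hdrop : arr.drop i = [] := by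
      apply List.drop_eq_nil_of_le; omega
    have hrep : n.toNat - max i arr.length = 0 := by omega
    simp [hdrop, hrep]
  | succ k ih =>
    have hlt : (i : Int) < n := by omega
    rw [pvBuild, if_neg (by omega)]
    have hrec := ih (i + 1) (by push_cast; omega) (by push_cast; omega)
    have hstep : ((i : Int) + 1) = ((i + 1 : Nat) : Int) := by push_cast; ring
    rw [hstep, hrec]
    by_cases hir : i < arr.length
    · -- existing row: row(i) pads arr[i]
      have hrow : pvRow arr arr.length l n i
          = arr[i] ++ List.replicate (n - l).toNat (0 : Int) := by
        rw [pvRow, if_pos (by exact_mod_cast hir)]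
        rw [PySem.List.pyGetD_natCast]
        simp [List.getD, hir]
      have hdrop : arr.drop i = arr[i] :: arr.drop (i + 1) :=
        List.drop_eq_getElem_cons hir
      have hmax1 : max i arr.length = arr.length := by omega
      have hmax2 : max (i + 1) arr.length = arr.length := by omega
      rw [hrow, hmax1, hmax2, hdrop, List.map_cons, List.cons_append]
    · -- past the last row: row(i) is a fresh zero row
      have hrow : pvRow arr arr.length l n i = List.replicate l.toNat (0 : Int) := by
        rw [pvRow, if_neg (by exact_mod_cast hir)]
      have hdrop1 : arr.drop i = [] := List.drop_eq_nil_of_le (by omega)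
      have hdrop2 : arr.drop (i + 1) = [] := List.drop_eq_nil_of_le (by omega)
      have hmax1 : max i arr.length = i := by omega
      have hmax2 : max (i + 1) arr.length = i + 1 := by omega
      have hrep : n.toNat - i = (n.toNat - (i + 1)) + 1 := by omega
      rw [hrow, hdrop1, hdrop2, hmax1, hmax2]
      simp [hrep, List.replicate_succ]

theorem solution_eq_alt (arr : List (List Int)) (hpre : arr ≠ []) :
    solution arr = solution_alt arr := by
  unfold solution solution_alt
  simp only []
  set r : Int := (arr.length : Int) with hr
  set l : Int := ((PySem.List.pyGetD arr 0 []).length : Int) with hl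
  have hr1 : 1 ≤ r := by
    rw [hr]
    have : arr.length ≠ 0 := by simpa [List.length_eq_zero_iff] using hpre
    omega
  have hl0 : 0 ≤ l := by rw [hl]; positivity
  have hB := pvBuild_eq arr l (max r l) (by rw [hr]; exact le_max_left _ _) 0
    (by positivity)
  rw [← hr] at hB
  simp only [Nat.cast_zero, List.drop_zero, Nat.zero_max] at hB
  rw [hB]
  by_cases h : r > l
  · -- extend branch; n = r, no appended rows
    rw [if_pos h]
    have hn : max r l = r := by omega
    rw [hn]
    have hrep0 : r.toNat - arr.length = 0 := by omega
    have := foldl_set_map (fun row => row ++ List.replicate (r - l).toNat (0 : Int)) ([] : List Int) arr []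
    simp only [List.nil_append, List.length_nil, Nat.cast_zero, zero_add] at this
    rw [← hr] at this
    rw [this, hrep0]
    simp
  · -- append branch; n = l, no extended columns
    rw [if_neg h]
    have hn : max r l = l := by omega
    rw [hn]
    have hz : (l - l).toNat = 0 := by omega
    rw [hz]
    simp only [List.replicate_zero, List.append_nil, List.map_id']
    rw [PySem.List.pyRange_one, List.foldl_map, foldl_append_const]
    have hc : (l - r - 0).toNat = l.toNat - arr.length := by omega
    rw [hc]

-- ===== VERDICT (by name: the statement is the Claim_ definition above) =====
theorem solution_spec : Claim_equal_solution := by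
  intro arr _ hpre
  unfold Spec_solution
  exact solution_eq_alt arr hpre
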